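-- pv_equiv track=rewrite | github.com/ChrisCScott/forecaster | ledger.py | nearest_year
-- ===== SOURCE A (Python) =====
-- def nearest_year(vals, year):
--     """ Finds the nearest (past) year to `year` in `vals`.
--
--     This is a companion method to `inflation_adjust()`. It's meant to be
--     used when you want to pull a value out of an incomplete dict without
--     inflation-adjusting it (e.g. when you want to grab the most recent
--     percentage rate from a dict of `{year: Decimal}` pairs.)
--
--     If `year` is in `vals`, then this method returns `year`.
--     If not, then this method tries to find the last year
--     before `year` that is in `vals`. If that doesn't work, then this
--     method tries to find the first year in `vals` following `year`.
--
--     Returns: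
--         A year in `vals` is near to `year`, preferring
--         the nearest preceding year (if it exists) over the nearest
--         following year. Returns `None` if `vals` is empty.
--     """
--     if vals == {}:
--         return None
--
--     # If the year is explicitly represented, no need to inflation-adjust
--     if year in vals:
--         return year
--
--     # Look for the most recent year prior to `year` that's in vals
--     key = max((k for k in vals if k < year), default=year)
--
--     # If that didn't work, look for the closest following year.
--     if key == year:
--         key = min((k for k in vals if k > year), default=year)
--
--     return key
-- ===== SOURCE B (Python) =====
-- import bisect
--
-- def nearest_year(vals, year):
--     """Sorted keys + one binary search instead of two generator scans."""
--     keys = sorted(vals)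
--     if not keys:
--         return None
--     i = bisect.bisect_left(keys, year)
--     if i < len(keys) and keys[i] == year:
--         return year
--     if i > 0:
--         return keys[i - 1]
--     return keys[0]
-- ===== Notes on version B (the rewrite author's own statement) =====
-- stated objective: idiomatic
-- what changed: Replaces the two generator scans with max/min default sentinels by sorting the keys once and locating year with a single bisect_left, reading the answer positionally.
import Mathlib
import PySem

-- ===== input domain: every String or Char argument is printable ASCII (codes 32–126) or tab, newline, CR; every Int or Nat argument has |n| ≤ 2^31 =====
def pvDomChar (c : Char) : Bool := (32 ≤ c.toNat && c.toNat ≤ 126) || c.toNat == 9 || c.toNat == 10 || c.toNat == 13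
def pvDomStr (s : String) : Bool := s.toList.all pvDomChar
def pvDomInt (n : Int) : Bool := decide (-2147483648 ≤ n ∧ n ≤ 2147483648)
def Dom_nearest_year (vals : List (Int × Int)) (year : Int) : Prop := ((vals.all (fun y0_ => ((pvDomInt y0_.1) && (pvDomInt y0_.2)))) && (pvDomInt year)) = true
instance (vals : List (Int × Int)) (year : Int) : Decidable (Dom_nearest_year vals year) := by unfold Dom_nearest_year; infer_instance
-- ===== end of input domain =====

-- B sorts the keys once and answers with a single bisect_left instead of A's two filtered max/min scans (idiomatic alternative; same results).


-- ===== PORT A =====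
def nearest_year (vals : List (Int × Int)) (year : Int) : Option Int :=
  if vals = [] then none
  else if year ∈ vals.map Prod.fst then some year
  else
    let key := PySem.List.maxD ((vals.map Prod.fst).filter (fun k => k < year)) (fun x => x) year
    let key' := if key = year then PySem.List.minD ((vals.map Prod.fst).filter (fun k => year < k)) (fun x => x) year else key
    some key'

-- ===== PORT B =====
-- getD's defaults are never read: each index used is provably in range there.
def nearest_year_alt (vals : List (Int × Int)) (year : Int) : Option Int :=
  let keys := PySem.List.sorted (vals.map Prod.fst) (fun x => x)
  if keys = [] then none
  else
    let i := PySem.List.bisectLeft keys year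
    if i < keys.length ∧ keys.getD i 0 = year then some year
    else if 0 < i then some (keys.getD (i - 1) 0)
    else some (keys.getD 0 0)

-- ===== PRECONDITION & SPEC =====
def Spec_nearest_year (vals : List (Int × Int)) (year : Int) (out : Option Int) : Prop := out = nearest_year_alt vals year
instance (vals : List (Int × Int)) (year : Int) (out : Option Int) : Decidable (Spec_nearest_year vals year out) := by unfold Spec_nearest_year; infer_instance

-- ===== CLAIM (what is proved, stated in full; the proofs are below) =====
def Claim_equal_nearest_year : Prop := ∀ (vals : List (Int × Int)) (year : Int), Dom_nearest_year vals year → Spec_nearest_year vals year (nearest_year vals year)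

-- ===== LEMMAS AND PROOFS =====
theorem nearest_year_core (ks : List Int) (year : Int) (hne : ks ≠ []) (hmemX : year ∉ ks) :
    (let key := PySem.List.maxD (ks.filter (fun k => k < year)) (fun x => x) year
     let key' := if key = year then PySem.List.minD (ks.filter (fun k => year < k)) (fun x => x) year else key
     (some key' : Option Int)) =
    (let keys := PySem.List.sorted ks (fun x => x)
     let i := PySem.List.bisectLeft keys year
     if i < keys.length ∧ keys.getD i 0 = year then some year
     else if 0 < i then some (keys.getD (i - 1) 0)
     else some (keys.getD 0 0)) := by
  have hpw : (PySem.List.sorted ks (fun x => x)).Pairwise (· ≤ ·) := by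
    simpa using PySem.List.sorted_pairwise ks (fun x => x)
  obtain ⟨hile, hlt, hge⟩ := PySem.List.bisectLeft_spec _ year hpw
  set keys := PySem.List.sorted ks (fun x => x) with hk
  set i := PySem.List.bisectLeft keys year with hi
  have hmemiff : ∀ x : Int, x ∈ keys ↔ x ∈ ks := fun x =>
    PySem.List.mem_sorted ks (fun x => x) false x
  have hklen : 0 < keys.length := List.length_pos_iff.mpr
    (by simpa [hk, PySem.List.sorted_eq_nil_iff] using hne)
  -- B's first branch condition is false: keys[i] = year would put year in ks
  have hcond : ¬ (i < keys.length ∧ keys.getD i 0 = year) := by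
    rintro ⟨h1, h2⟩
    rw [List.getD_eq_getElem?_getD, List.getElem?_eq_getElem h1] at h2
    exact hmemX ((hmemiff _).mp (h2 ▸ List.getElem_mem h1))
  rw [if_neg hcond]
  by_cases hlo : ∃ k ∈ ks, k < year
  · -- nearest preceding year exists
    obtain ⟨k0, hk0, hk0lt⟩ := hlo
    have hfne : ks.filter (fun k => k < year) ≠ [] := by
      intro h
      have := List.filter_eq_nil_iff.mp h k0 hk0
      simp [hk0lt] at this
    obtain ⟨m, hm⟩ : ∃ m, PySem.List.max? (ks.filter (fun k => k < year)) (fun x => x) = some m := by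
      cases h : PySem.List.max? (ks.filter (fun k => k < year)) (fun x => x) with
      | none => exact absurd ((PySem.List.max?_eq_none_iff _ _).mp h) hfne
      | some m => exact ⟨m, rfl⟩
    have hmmem := PySem.List.max?_mem hm
    have hmks : m ∈ ks := (List.mem_filter.mp hmmem).1
    have hmlt : m < year := by simpa using (List.mem_filter.mp hmmem).2
    have hmax : ∀ y ∈ ks.filter (fun k => k < year), y ≤ m := by
      intro y hy; simpa using PySem.List.max?_isMax hm y hy
    -- A returns some m
    have hA : PySem.List.maxD (ks.filter (fun k => k < year)) (fun x => x) year = m := by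
      simp [PySem.List.maxD, hm]
    -- index of m in keys
    obtain ⟨j, hj, hjm⟩ := List.getElem_of_mem ((hmemiff m).mpr hmks)
    have hjm' : keys[j]'(by simpa [← hk] using hj) = m := hjm
    have hj' : j < keys.length := by simpa [← hk] using hj
    have hji : j < i := by
      by_contra h
      have := hge j hj' (by omega)
      omega
    have hipos : 0 < i := by omega
    have hi1 : i - 1 < keys.length := by omega
    have hlow : keys[i-1]'hi1 < year := hlt (i-1) hi1 (by omega)
    have hmem1 : keys[i-1]'hi1 ∈ ks := (hmemiff _).mp (List.getElem_mem hi1)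
    have hle1 : keys[i-1]'hi1 ≤ m :=
      hmax _ (List.mem_filter.mpr ⟨hmem1, by simpa using hlow⟩)
    have hle2 : m ≤ keys[i-1]'hi1 := by
      have := PySem.List.key_sorted_getElem_mono ks (fun x => x) (p := j) (q := i-1)
        (by omega) (by simpa [← hk] using hi1)
      simp only [← hk] at this
      omega
    have hBval : keys.getD (i-1) 0 = m := by
      rw [List.getD_eq_getElem?_getD, List.getElem?_eq_getElem hi1]
      simp; omega
    rw [if_pos hipos, hBval]
    simp only [hA]
    rw [if_neg (by omega)]
  · -- everything in ks is above year
    have hall : ∀ k ∈ ks, year < k := by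
      intro k hkk
      rcases lt_trichotomy k year with h | h | h
      · exact absurd ⟨k, hkk, h⟩ hlo
      · exact absurd (h ▸ hkk) hmemX
      · exact h
    have hfe : ks.filter (fun k => k < year) = [] :=
      List.filter_eq_nil_iff.mpr (fun k hkk => by have := hall k hkk; simp; omega)
    have hA : PySem.List.maxD (ks.filter (fun k => k < year)) (fun x => x) year = year := by
      simp [PySem.List.maxD, hfe, PySem.List.max?]
    have hff : ks.filter (fun k => year < k) = ks :=
      List.filter_eq_self.mpr (fun k hkk => by have := hall k hkk; simpa)
    obtain ⟨m, hm⟩ : ∃ m, PySem.List.min? (ks.filter (fun k => year < k)) (fun x => x) = some m := by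
      cases h : PySem.List.min? (ks.filter (fun k => year < k)) (fun x => x) with
      | none => exact absurd (hff ▸ (PySem.List.min?_eq_none_iff _ _).mp h) hne
      | some m => exact ⟨m, rfl⟩
    have hmks : m ∈ ks := hff ▸ PySem.List.min?_mem hm
    have hmin : ∀ y ∈ ks, m ≤ y := by
      intro y hy
      have hy' : y ∈ ks.filter (fun k => year < k) := hff.symm ▸ hy
      simpa using PySem.List.min?_isMin hm y hy'
    have hi0 : i = 0 := by
      by_contra h
      have h0 : keys[0]'hklen < year := hlt 0 hklen (by omega)
      have := hall _ ((hmemiff _).mp (List.getElem_mem hklen))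
      omega
    obtain ⟨j, hj, hjm⟩ := List.getElem_of_mem ((hmemiff m).mpr hmks)
    have hjm' : keys[j]'(by simpa [← hk] using hj) = m := hjm
    have hj' : j < keys.length := by simpa [← hk] using hj
    have hle1 : m ≤ keys[0]'hklen := hmin _ ((hmemiff _).mp (List.getElem_mem hklen))
    have hle2 : keys[0]'hklen ≤ m := by
      have := PySem.List.key_sorted_getElem_mono ks (fun x => x) (p := 0) (q := j)
        (by omega) (by simpa [← hk] using hj')
      simp only [← hk] at this
      omega
    have hBval : keys.getD 0 0 = m := by
      rw [List.getD_eq_getElem?_getD, List.getElem?_eq_getElem hklen]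
      simp; omega
    rw [if_neg (by omega), hBval]
    simp only [hA, PySem.List.minD, hm, Option.getD_some, if_pos trivial]

theorem nearest_year_found (ks : List Int) (year : Int) (hmem : year ∈ ks) :
    (let keys := PySem.List.sorted ks (fun x => x)
     let i := PySem.List.bisectLeft keys year
     if i < keys.length ∧ keys.getD i 0 = year then some year
     else if 0 < i then some (keys.getD (i - 1) 0)
     else some (keys.getD 0 0)) = (some year : Option Int) := by
  have hmemk : year ∈ PySem.List.sorted ks (fun x => x) :=
    (PySem.List.mem_sorted ks (fun x => x) false year).mpr hmem
  obtain ⟨j, hj, hjy⟩ := List.getElem_of_mem hmemk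
  have hpw : (PySem.List.sorted ks (fun x => x)).Pairwise (· ≤ ·) := by
    simpa using PySem.List.sorted_pairwise ks (fun x => x)
  obtain ⟨hile, hlt, hge⟩ := PySem.List.bisectLeft_spec _ year hpw
  set keys := PySem.List.sorted ks (fun x => x) with hk
  set i := PySem.List.bisectLeft keys year with hi
  have hjy' : keys[j]'(by simpa [← hk] using hj) = year := hjy
  have hj' : j < keys.length := by simpa [← hk] using hj
  have hji : i ≤ j := by
    by_contra h
    have := hlt j hj' (by omega)
    omega
  have hiL : i < keys.length := lt_of_le_of_lt hji hj
  have h1 : year ≤ keys[i] := hge i hiL le_rfl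
  have h2 : keys[i] ≤ keys[j]'hj' := by
    simpa [← hk] using PySem.List.key_sorted_getElem_mono ks (fun x => x) hji hj
  have : keys[i] = year := by omega
  rw [if_pos ⟨hiL, by rw [List.getD_eq_getElem?_getD, List.getElem?_eq_getElem hiL]; simpa using this⟩]

-- ===== VERDICT (by name: the statement is the Claim_ definition above) =====
theorem nearest_year_spec : Claim_equal_nearest_year := by
  intro vals year _
  unfold Spec_nearest_year nearest_year nearest_year_alt
  by_cases hv : vals = []
  · subst hv; rfl
  · have hks : vals.map Prod.fst ≠ [] := by simp [hv]
    have hsk : PySem.List.sorted (vals.map Prod.fst) (fun x => x) ≠ [] := by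
      simpa [PySem.List.sorted_eq_nil_iff] using hks
    simp only [if_neg hv, if_neg hsk]
    by_cases hmem : year ∈ vals.map Prod.fst
    · rw [if_pos hmem, nearest_year_found _ _ hmem]
    · rw [if_neg hmem, nearest_year_core _ _ hks hmem]
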